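-- pv_equiv track=rewrite | github.com/nexon33/voynich-grammar-analysis | scripts/phase4/validate_oak_oat_locations.py | estimate_folios_by_position
-- ===== SOURCE A (Python) =====
-- from collections import defaultdict, Counter
--
-- def estimate_folios_by_position(words):
--     """Estimate folio locations based on word position."""
--
--     # Average ~50 words per folio based on typical Voynich density
--     words_per_folio = 50
--
--     folio_to_words = defaultdict(list)
--
--     # Voynich has ~240 folios (f1r to f116v, with gaps)
--     # For simplicity, distribute words evenly
--
--     for i, word in enumerate(words):
--         folio_num = (i // words_per_folio) + 1
--         # Alternate r/v
--         side = "r" if (folio_num % 2) == 1 else "v"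
--         actual_folio_num = (folio_num + 1) // 2
--         folio = f"f{actual_folio_num}{side}"
--         folio_to_words[folio].append(word)
--
--     return folio_to_words
-- ===== SOURCE B (Python) =====
-- from collections import defaultdict
--
--
-- def _folio_label(k):
--     """Label of the k-th (0-based) 50-word chunk, in closed form."""
--     side = "r" if k % 2 == 0 else "v"
--     return f"f{(k + 2) // 2}{side}"
--
--
-- def estimate_folios_by_position(words):
--     """Estimate folio locations based on word position."""
--     n_chunks = (len(words) + 49) // 50
--     items = [(_folio_label(k), words[50 * k:50 * k + 50]) for k in range(n_chunks)]
--     return defaultdict(list, items)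
-- ===== Notes on version B (the rewrite author's own statement) =====
-- stated objective: faster
-- what changed: B computes the number of 50-word chunks in closed form and builds the (folio label, chunk) pairs directly as a list comprehension over chunk indices (label derived from k alone, chunk taken as one slice), turning that pair list into the result dict in one step, instead of A's per-word loop that re-derives the label from each word index and appends words one at a time into a growing defaultdict.
import Mathlib
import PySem

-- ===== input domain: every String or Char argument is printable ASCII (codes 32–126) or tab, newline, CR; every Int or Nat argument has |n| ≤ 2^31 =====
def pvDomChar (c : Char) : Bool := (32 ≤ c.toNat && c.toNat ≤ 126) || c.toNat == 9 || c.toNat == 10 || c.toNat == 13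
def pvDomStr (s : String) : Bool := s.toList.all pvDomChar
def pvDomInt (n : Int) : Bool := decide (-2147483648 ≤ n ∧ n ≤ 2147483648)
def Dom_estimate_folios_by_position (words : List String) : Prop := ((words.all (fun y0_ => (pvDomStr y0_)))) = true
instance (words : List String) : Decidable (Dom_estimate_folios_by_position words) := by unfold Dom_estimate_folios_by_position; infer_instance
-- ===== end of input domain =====

-- B replaces A's per-word accumulation loop by a closed-form chunk count and a direct
-- comprehension of (label, chunk) pairs, built into the result dict in one step (alternative
-- decomposition; B returns defaultdict(list, pairs), equal as a mapping to A's defaultdict).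

-- ===== PORT A =====
-- loop body of A: folio_to_words[folio].append(word) for the word at index iw.1
def pvStepA (d : PySem.Dict String (List String)) (iw : Int × String) : PySem.Dict String (List String) :=
  let folio_num := PySem.Int.floordiv iw.1 50 + 1
  let side := if PySem.Int.mod folio_num 2 = 1 then "r" else "v"
  let actual_folio_num := PySem.Int.floordiv (folio_num + 1) 2
  let folio := "f" ++ PySem.Int.toStr actual_folio_num ++ side
  d.modify folio [] (fun l => l ++ [iw.2])

def estimate_folios_by_position (words : List String) : List (String × List String) :=
  ((PySem.List.enumerate words 0).foldl pvStepA PySem.Dict.empty).items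

-- ===== PORT B =====
-- helper _folio_label(k) of Source B
def pvFolioLabel (k : Int) : String :=
  let side := if PySem.Int.mod k 2 = 0 then "r" else "v"
  "f" ++ PySem.Int.toStr (PySem.Int.floordiv (k + 2) 2) ++ side

-- Source B: n_chunks in closed form, a comprehension of (label, chunk-slice) pairs, dict built from it
def estimate_folios_by_position_alt (words : List String) : List (String × List String) :=
  let n_chunks := PySem.Int.floordiv ((words.length : Int) + 49) 50
  let items := (PySem.List.pyRange 0 n_chunks 1).map
    (fun k => (pvFolioLabel k, PySem.List.slice words (some (50 * k)) (some (50 * k + 50))))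
  (PySem.Dict.ofList items).items

-- ===== PRECONDITION & SPEC =====
def Spec_estimate_folios_by_position (words : List String) (out : List (String × List String)) : Prop := out = estimate_folios_by_position_alt words
instance (words : List String) (out : List (String × List String)) : Decidable (Spec_estimate_folios_by_position words out) := by unfold Spec_estimate_folios_by_position; infer_instance

-- ===== CLAIM (what is proved, stated in full; the proofs are below) =====
def Claim_equal_estimate_folios_by_position : Prop := ∀ (words : List String), Dom_estimate_folios_by_position words → Spec_estimate_folios_by_position words (estimate_folios_by_position words)

-- ===== LEMMAS AND PROOFS =====

-- the folio label of 0-based chunk m, exactly as port A computes it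
def pvLabel (m : Int) : String :=
  let folio_num := m + 1
  let side := if PySem.Int.mod folio_num 2 = 1 then "r" else "v"
  "f" ++ PySem.Int.toStr (PySem.Int.floordiv (folio_num + 1) 2) ++ side

-- chunk-at-a-time reference computation for port A
def pvBfold : List String → Int → PySem.Dict String (List String) → PySem.Dict String (List String)
  | [], _, d => d
  | w :: t, m, d => pvBfold ((w :: t).drop 50) (m + 1) (d.modify (pvLabel m) [] (fun l => l ++ (w :: t).take 50))
termination_by l => l.length
decreasing_by simp

-- the (label, chunk) pair list both ports' results are reduced to
def pvPairs : List String → Int → List (String × List String)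
  | [], _ => []
  | w :: t, m => (pvLabel m, (w :: t).take 50) :: pvPairs ((w :: t).drop 50) (m + 1)
termination_by l => l.length
decreasing_by simp

theorem pvBfold_nil (m : Int) (d : PySem.Dict String (List String)) : pvBfold [] m d = d := by
  simp [pvBfold]

theorem pvBfold_ne_nil (l : List String) (h : l ≠ []) (m : Int) (d : PySem.Dict String (List String)) :
    pvBfold l m d = pvBfold (l.drop 50) (m + 1) (d.modify (pvLabel m) [] (fun x => x ++ l.take 50)) := by
  cases l with
  | nil => exact absurd rfl h
  | cons w t => simp [pvBfold]

theorem pvPairs_nil (m : Int) : pvPairs [] m = [] := by simp [pvPairs]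

theorem pvPairs_ne_nil (l : List String) (h : l ≠ []) (m : Int) :
    pvPairs l m = (pvLabel m, l.take 50) :: pvPairs (l.drop 50) (m + 1) := by
  cases l with
  | nil => exact absurd rfl h
  | cons w t => simp [pvPairs]

theorem pvModify_append (d : PySem.Dict String (List String)) (s : String) (u v : List String) :
    (d.modify s [] (fun l => l ++ u)).modify s [] (fun l => l ++ v)
      = d.modify s [] (fun l => l ++ (u ++ v)) := by
  simp [PySem.Dict.modify, PySem.Dict.getD_insert_self, PySem.Dict.insert_insert_self, List.append_assoc]

theorem pvCollapse (s : String) (c : List String) (hc : c ≠ []) :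
    ∀ d : PySem.Dict String (List String),
      c.foldl (fun d w => d.modify s [] (fun l => l ++ [w])) d = d.modify s [] (fun l => l ++ c) := by
  induction c with
  | nil => exact absurd rfl hc
  | cons w t ih =>
    intro d
    cases t with
    | nil => simp [List.foldl]
    | cons y u =>
      rw [List.foldl_cons, ih (by simp), pvModify_append]
      rfl

theorem pvStepA_eq (m j : Int) (hj : 0 ≤ j) (hj50 : j < 50) (w : String)
    (d : PySem.Dict String (List String)) :
    pvStepA d (50 * m + j, w) = d.modify (pvLabel m) [] (fun l => l ++ [w]) := by
  have h : PySem.Int.floordiv (50 * m + j) 50 = m := by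
    rw [PySem.Int.floordiv_eq_iff_of_pos (by norm_num)]
    constructor <;> nlinarith
  simp only [pvStepA, pvLabel, h]

theorem pvChunkA (c : List String) :
    ∀ (m j : Int) (d : PySem.Dict String (List String)), 0 ≤ j → j + c.length ≤ 50 →
      (PySem.List.enumerate c (50 * m + j)).foldl pvStepA d
        = c.foldl (fun d w => d.modify (pvLabel m) [] (fun l => l ++ [w])) d := by
  induction c with
  | nil => intro m j d _ _; simp [PySem.List.enumerate_nil]
  | cons w t ih =>
    intro m j d hj hle
    rw [PySem.List.enumerate_cons]
    simp only [List.foldl_cons]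
    have hj50 : j < 50 := by simp at hle; omega
    rw [pvStepA_eq m j hj hj50 w d, show 50 * m + j + 1 = 50 * m + (j + 1) by ring,
      ih m (j + 1) _ (by omega) (by simp at hle ⊢; omega)]

theorem pvMainA : ∀ (n : Nat) (ws : List String) (m : Int) (d : PySem.Dict String (List String)),
    ws.length ≤ n →
    (PySem.List.enumerate ws (50 * m)).foldl pvStepA d = pvBfold ws m d := by
  intro n
  induction n with
  | zero =>
    intro ws m d h
    have : ws = [] := List.length_eq_zero_iff.mp (Nat.le_zero.mp h)
    subst this
    simp [PySem.List.enumerate_nil, pvBfold_nil]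
  | succ n ih =>
    intro ws m d h
    cases hws : ws with
    | nil => simp [PySem.List.enumerate_nil, pvBfold_nil]
    | cons w t =>
      subst hws
      have hsplit : (w :: t) = (w :: t).take 50 ++ (w :: t).drop 50 := (List.take_append_drop _ _).symm
      conv_lhs => rw [hsplit]
      rw [PySem.List.enumerate_append, List.foldl_append]
      have htk : (PySem.List.enumerate ((w :: t).take 50) (50 * m)).foldl pvStepA d
          = d.modify (pvLabel m) [] (fun l => l ++ (w :: t).take 50) := by
        rw [show (50 : Int) * m = 50 * m + 0 by ring]
        rw [pvChunkA ((w :: t).take 50) m 0 d le_rfl (by simp only [List.length_take]; omega)]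
        exact pvCollapse _ _ (by simp) d
      rw [htk, pvBfold_ne_nil (w :: t) (by simp) m d]
      by_cases hdrop : (w :: t).drop 50 = []
      · rw [hdrop]
        simp [PySem.List.enumerate_nil, pvBfold_nil]
      · have hlen : 50 < (w :: t).length := by
          by_contra hc
          exact hdrop (List.drop_eq_nil_of_le (by omega))
        have htl : ((w :: t).take 50).length = 50 := by simp only [List.length_take]; omega
        rw [htl]
        rw [show (50 : Int) * m + (50 : Nat) = 50 * (m + 1) by push_cast; ring]
        exact ih _ (m + 1) _ (by have hbc : (w :: t).length = t.length + 1 := rfl; simp only [List.length_drop]; omega)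

-- ---- injectivity of the folio labels ----

theorem pvDigitCharInj : ∀ a < 10, ∀ b < 10, Nat.digitChar a = Nat.digitChar b → a = b := by decide

theorem pvMapDigitInj : ∀ (l1 l2 : List Nat), (∀ x ∈ l1, x < 10) → (∀ x ∈ l2, x < 10) →
    l1.map Nat.digitChar = l2.map Nat.digitChar → l1 = l2 := by
  intro l1
  induction l1 with
  | nil => intro l2 _ _ h; cases l2 <;> simp_all
  | cons a t ih =>
    intro l2 h1 h2 h
    cases l2 with
    | nil => simp_all
    | cons b u =>
      simp only [List.map_cons, List.cons.injEq] at h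
      have ha := pvDigitCharInj a (h1 a (by simp)) b (h2 b (by simp)) h.1
      exact ha ▸ congrArg _ (ih u (fun x hx => h1 x (by simp [hx])) (fun x hx => h2 x (by simp [hx])) h.2)

theorem pvToDigitsCoreEq : ∀ (fuel n : Nat) (acc : List Char), n < fuel →
    Nat.toDigitsCore 10 fuel n acc
      = (if n = 0 then ['0'] else ((Nat.digits 10 n).map Nat.digitChar).reverse) ++ acc := by
  intro fuel
  induction fuel with
  | zero => intro n acc h; omega
  | succ f ih =>
    intro n acc h
    rw [Nat.toDigitsCore]
    by_cases h0 : n / 10 = 0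
    · have hn10 : n < 10 := by omega
      simp only [h0]
      by_cases hn : n = 0
      · subst hn
        norm_num [Nat.digitChar]
      · rw [if_neg hn, Nat.digits_def' (by norm_num : (1:Nat) < 10) (by omega), h0]
        rw [Nat.mod_eq_of_lt hn10]
        simp
    · rw [if_neg h0]
      have hlt : n / 10 < f := by
        have := Nat.div_lt_self (by omega : 0 < n) (by norm_num : 1 < 10)
        omega
      rw [ih (n / 10) _ hlt, if_neg h0, if_neg (by omega : ¬ n = 0)]
      conv_rhs => rw [Nat.digits_def' (by norm_num : (1:Nat) < 10) (by omega : 0 < n)]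
      simp [List.append_assoc]

theorem pvToDigitsEq (n : Nat) :
    Nat.toDigits 10 n = (if n = 0 then ['0'] else ((Nat.digits 10 n).map Nat.digitChar).reverse) := by
  have := pvToDigitsCoreEq (n + 1) n [] (by omega)
  simpa [Nat.toDigits] using this

theorem pvToDigitsInj (a b : Nat) (h : Nat.toDigits 10 a = Nat.toDigits 10 b) : a = b := by
  rw [pvToDigitsEq, pvToDigitsEq] at h
  by_cases ha : a = 0 <;> by_cases hb : b = 0
  · omega
  · exfalso
    rw [if_pos ha, if_neg hb] at h
    have hd : (Nat.digits 10 b).map Nat.digitChar = ['0'] := by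
      have := congrArg List.reverse h
      simpa using this.symm
    have : Nat.digits 10 b = [0] := by
      apply pvMapDigitInj _ [0] (fun x hx => Nat.digits_lt_base (by norm_num) hx) (by simp)
      simpa using hd
    have hb0 : b = Nat.ofDigits 10 (Nat.digits 10 b) := (Nat.ofDigits_digits 10 b).symm
    rw [this] at hb0
    simp [Nat.ofDigits] at hb0
    omega
  · exfalso
    rw [if_neg ha, if_pos hb] at h
    have hd : (Nat.digits 10 a).map Nat.digitChar = ['0'] := by
      have := congrArg List.reverse h
      simpa using this
    have : Nat.digits 10 a = [0] := by
      apply pvMapDigitInj _ [0] (fun x hx => Nat.digits_lt_base (by norm_num) hx) (by simp)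
      simpa using hd
    have ha0 : a = Nat.ofDigits 10 (Nat.digits 10 a) := (Nat.ofDigits_digits 10 a).symm
    rw [this] at ha0
    simp [Nat.ofDigits] at ha0
    omega
  · rw [if_neg ha, if_neg hb] at h
    have hmap : (Nat.digits 10 a).map Nat.digitChar = (Nat.digits 10 b).map Nat.digitChar := by
      have := congrArg List.reverse h
      simpa using this
    have hdig := pvMapDigitInj _ _ (fun x hx => Nat.digits_lt_base (by norm_num) hx)
      (fun x hx => Nat.digits_lt_base (by norm_num) hx) hmap
    calc a = Nat.ofDigits 10 (Nat.digits 10 a) := (Nat.ofDigits_digits 10 a).symm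
      _ = Nat.ofDigits 10 (Nat.digits 10 b) := by rw [hdig]
      _ = b := Nat.ofDigits_digits 10 b

theorem pvToCharsInj (a b : Int) (ha : 0 ≤ a) (hb : 0 ≤ b)
    (h : PySem.Int.toChars a = PySem.Int.toChars b) : a = b := by
  rw [PySem.Int.toChars, PySem.Int.toChars, if_neg (by omega), if_neg (by omega)] at h
  have := pvToDigitsInj _ _ h
  omega

theorem pvLabelInj (m1 m2 : Int) (h1 : 0 ≤ m1) (h2 : 0 ≤ m2) (h : pvLabel m1 = pvLabel m2) :
    m1 = m2 := by
  have hl := congrArg String.toList h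
  simp only [pvLabel] at hl
  have e1 : PySem.Int.mod (m1 + 1) 2 = (m1 + 1) % 2 := PySem.Int.mod_eq_emod_of_pos (by norm_num)
  have e2 : PySem.Int.mod (m2 + 1) 2 = (m2 + 1) % 2 := PySem.Int.mod_eq_emod_of_pos (by norm_num)
  have f1 : PySem.Int.floordiv (m1 + 1 + 1) 2 = (m1 + 2) / 2 := by
    rw [show m1 + 1 + 1 = m1 + 2 by ring]; exact PySem.Int.floordiv_eq_ediv_of_pos (by norm_num)
  have f2 : PySem.Int.floordiv (m2 + 1 + 1) 2 = (m2 + 2) / 2 := by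
    rw [show m2 + 1 + 1 = m2 + 2 by ring]; exact PySem.Int.floordiv_eq_ediv_of_pos (by norm_num)
  rw [e1, e2, f1, f2] at hl
  by_cases p1 : (m1 + 1) % 2 = 1 <;> by_cases p2 : (m2 + 1) % 2 = 1 <;>
      simp only [p1, p2, if_pos] at hl
  all_goals try
    (have hq : (m1 + 2) / 2 = (m2 + 2) / 2 :=
      pvToCharsInj _ _ (by positivity) (by positivity) (by simpa using hl)
     omega)
  all_goals simp at hl

-- ---- items of A's reference fold ----

theorem pvBfoldItems : ∀ (n : Nat) (ws : List String) (m : Int) (d : PySem.Dict String (List String)),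
    ws.length ≤ n → 0 ≤ m → d.keys.Nodup →
    (∀ j : Int, m ≤ j → d.contains (pvLabel j) = false) →
    (pvBfold ws m d).items = d.items ++ pvPairs ws m := by
  intro n
  induction n with
  | zero =>
    intro ws m d h _ _ _
    have : ws = [] := List.length_eq_zero_iff.mp (Nat.le_zero.mp h)
    subst this
    simp [pvBfold_nil, pvPairs_nil]
  | succ n ih =>
    intro ws m d h hm hnd hfresh
    cases hws : ws with
    | nil => simp [pvBfold_nil, pvPairs_nil]
    | cons w t =>
      subst hws
      rw [pvBfold_ne_nil _ (by simp) m d, pvPairs_ne_nil _ (by simp) m]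
      have hcm : d.contains (pvLabel m) = false := hfresh m le_rfl
      have hmod : d.modify (pvLabel m) [] (fun x => x ++ (w :: t).take 50)
          = d.insert (pvLabel m) ((w :: t).take 50) := by
        rw [PySem.Dict.modify, PySem.Dict.getD_of_not_contains _ _ hcm]
        simp
      rw [hmod]
      rw [ih ((w :: t).drop 50) (m + 1) _ (by simp only [List.length_drop]; simp at h ⊢; omega)
        (by omega) (PySem.Dict.nodup_keys_insert _ _ _ hnd) ?_]
      · rw [PySem.Dict.items_insert_of_not_contains _ _ hcm]
        simp
      · intro j hj
        rw [PySem.Dict.contains_insert]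
        have hne : pvLabel j ≠ pvLabel m := fun hc => by
          have := pvLabelInj j m (by omega) hm hc
          omega
        simp only [beq_eq_false_iff_ne, Bool.or_eq_false_iff]
        exact ⟨by simpa using hne, hfresh j (by omega)⟩

-- ---- B's pair list equals pvPairs ----

theorem pvSlice_chunk (words : List String) (m : Nat) :
    PySem.List.slice words (some (50 * (m : Int))) (some (50 * (m : Int) + 50))
      = (words.drop (50 * m)).take 50 := by
  have h1 : (50 : Int) * (m : Int) = ((50 * m : Nat) : Int) := by push_cast; ring
  have h2 : (50 : Int) * (m : Int) + 50 = ((50 * m + 50 : Nat) : Int) := by push_cast; ring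
  rw [h2, h1, PySem.List.slice_natCast]
  congr 1
  omega

theorem pvFolioLabel_eq (k : Int) : pvFolioLabel k = pvLabel k := by
  simp only [pvFolioLabel, pvLabel]
  have e1 : PySem.Int.mod k 2 = k % 2 := PySem.Int.mod_eq_emod_of_pos (by norm_num)
  have e2 : PySem.Int.mod (k + 1) 2 = (k + 1) % 2 := PySem.Int.mod_eq_emod_of_pos (by norm_num)
  rw [e1, e2, show k + 1 + 1 = k + 2 by ring]
  congr 1
  by_cases hp : k % 2 = 0
  · rw [if_pos hp, if_pos (by omega)]
  · rw [if_neg hp, if_neg (by omega)]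

theorem pvMainB (words : List String) : ∀ (n m : Nat),
    (PySem.Int.floordiv ((words.length : Int) + 49) 50).toNat ≤ m + n →
    (PySem.List.pyRange (m : Int) (PySem.Int.floordiv ((words.length : Int) + 49) 50) 1).map
        (fun k => (pvFolioLabel k, PySem.List.slice words (some (50 * k)) (some (50 * k + 50))))
      = pvPairs (words.drop (50 * m)) m := by
  have hch : PySem.Int.floordiv ((words.length : Int) + 49) 50 = (((words.length + 49) / 50 : Nat) : Int) := by
    have := PySem.Int.floordiv_natCast (words.length + 49) 50
    push_cast at this ⊢
    omega
  intro n
  induction n with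
  | zero =>
    intro m h
    rw [hch] at h ⊢
    simp at h
    rw [PySem.List.pyRange_one_eq_nil (by exact_mod_cast h)]
    have : words.drop (50 * m) = [] := List.drop_eq_nil_of_le (by omega)
    rw [this, pvPairs_nil, List.map_nil]
  | succ n ih =>
    intro m h
    by_cases hm : ((words.length + 49) / 50 : Nat) ≤ m
    · rw [hch]
      rw [PySem.List.pyRange_one_eq_nil (by exact_mod_cast hm)]
      have : words.drop (50 * m) = [] := List.drop_eq_nil_of_le (by omega)
      rw [this, pvPairs_nil, List.map_nil]
    · rw [Nat.not_le] at hm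
      have hlt : ((m : Int)) < PySem.Int.floordiv ((words.length : Int) + 49) 50 := by
        rw [hch]; exact_mod_cast hm
      rw [PySem.List.pyRange_one_cons hlt]
      rw [List.map_cons]
      have hne : words.drop (50 * m) ≠ [] := by
        intro hnil
        have := List.drop_eq_nil_iff.mp hnil
        omega
      rw [pvPairs_ne_nil _ hne m]
      congr 1
      · rw [pvSlice_chunk, pvFolioLabel_eq _]
      · have hdd : (words.drop (50 * m)).drop 50 = words.drop (50 * (m + 1)) := by
          rw [List.drop_drop]; congr 1
        rw [hdd]
        have := ih (m + 1) (by omega)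
        rw [show ((m : Int) + 1) = (((m + 1 : Nat)) : Int) by push_cast; ring]
        exact this

-- ---- keys of B's pair list are distinct ----

theorem pvRangeLabelsNodup (b : Int) :
    ((PySem.List.pyRange 0 b 1).map pvFolioLabel).Nodup := by
  apply List.Nodup.map_on ?_ (PySem.List.nodup_pyRange_one 0 b)
  intro x hx y hy hxy
  have hx0 : 0 ≤ x := ((PySem.List.mem_pyRange_one).mp hx).1
  have hy0 : 0 ≤ y := ((PySem.List.mem_pyRange_one).mp hy).1
  rw [pvFolioLabel_eq x, pvFolioLabel_eq y] at hxy
  exact pvLabelInj x y hx0 hy0 hxy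

-- ===== VERDICT (by name: the statement is the Claim_ definition above) =====
theorem estimate_folios_by_position_spec : Claim_equal_estimate_folios_by_position := by
  intro words _
  unfold Spec_estimate_folios_by_position
  unfold estimate_folios_by_position estimate_folios_by_position_alt
  simp only []
  -- A side
  have hA := pvMainA words.length words 0 PySem.Dict.empty le_rfl
  rw [show (50 : Int) * 0 = 0 by ring] at hA
  rw [hA, pvBfoldItems words.length words 0 PySem.Dict.empty le_rfl le_rfl
    PySem.Dict.nodup_keys_empty (fun j _ => PySem.Dict.contains_empty _)]
  -- B side
  set nch := PySem.Int.floordiv ((words.length : Int) + 49) 50 with hnch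
  have hofl : PySem.Dict.ofList ((PySem.List.pyRange 0 nch 1).map
        (fun k => (pvFolioLabel k, PySem.List.slice words (some (50 * k)) (some (50 * k + 50)))))
      = (PySem.List.pyRange 0 nch 1).foldl
        (fun d k => d.insert (pvFolioLabel k) (PySem.List.slice words (some (50 * k)) (some (50 * k + 50))))
        PySem.Dict.empty := by
    rw [PySem.Dict.ofList, PySem.Dict.update, List.foldl_map]
  rw [hofl]
  rw [PySem.Dict.items_foldl_insert_fresh _ _ _ _
    (fun a _ => PySem.Dict.contains_empty _) (pvRangeLabelsNodup nch)]
  have hB := pvMainB words (nch.toNat) 0 (by omega)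
  simp only [Nat.cast_zero, Nat.mul_zero, List.drop_zero] at hB
  rw [hB]
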